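-- pv_equiv track=rewrite | github.com/Alphabetsoup16/apex | src/apex/pipeline/observability.py | _max_severity_from_raw_findings
-- ===== SOURCE A (Python) =====
-- from typing import Any, Literal
--
-- _SEVERITY_RANK = {"none": 0, "low": 1, "medium": 2, "high": 3}
--
-- def _max_severity_from_raw_findings(
--     rows: list[dict[str, Any]],
-- ) -> Literal["none", "low", "medium", "high"]:
--     best = "none"
--     for r in rows:
--         if not isinstance(r, dict):
--             continue
--         sev = r.get("severity")
--         if sev not in _SEVERITY_RANK:
--             continue
--         if _SEVERITY_RANK[sev] > _SEVERITY_RANK[best]:  # type: ignore[index]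
--             best = sev
--     return best  # type: ignore[return-value]
-- ===== SOURCE B (Python) =====
-- _SEVERITY_RANK = {"none": 0, "low": 1, "medium": 2, "high": 3}
--
--
-- def _max_severity_from_raw_findings(rows):
--     # Phase 1: collect the set of valid severity labels present in the rows.
--     present = set()
--     for r in rows:
--         if isinstance(r, dict):
--             sev = r.get("severity")
--             if sev in _SEVERITY_RANK:
--                 present.add(sev)
--     # Phase 2: return the highest-priority label present, defaulting to "none".
--     for label in ("high", "medium", "low"):
--         if label in present:
--             return label
--     return "none"
-- ===== Notes on version B (the rewrite author's own statement) =====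
-- stated objective: idiomatic
-- what changed: Replaces the running-max comparison against a rank table by a two-phase presence-set: collect the valid severity labels into a set, then return the first of ['high','medium','low'] that is present, defaulting to 'none'.
import Mathlib
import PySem

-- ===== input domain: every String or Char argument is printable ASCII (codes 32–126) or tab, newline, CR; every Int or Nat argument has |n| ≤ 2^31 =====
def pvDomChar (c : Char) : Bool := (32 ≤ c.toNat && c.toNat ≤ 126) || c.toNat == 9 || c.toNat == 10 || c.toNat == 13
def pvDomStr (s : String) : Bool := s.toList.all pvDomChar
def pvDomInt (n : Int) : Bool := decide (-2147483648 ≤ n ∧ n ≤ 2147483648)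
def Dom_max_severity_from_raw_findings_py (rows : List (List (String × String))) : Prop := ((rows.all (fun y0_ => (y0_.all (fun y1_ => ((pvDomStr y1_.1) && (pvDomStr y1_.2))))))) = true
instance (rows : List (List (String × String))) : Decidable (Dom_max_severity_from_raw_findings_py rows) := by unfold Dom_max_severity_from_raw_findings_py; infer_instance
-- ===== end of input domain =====

-- B replaces A's running-max comparison by a presence set plus a top-down priority scan (idiomatic; same cost).

-- ===== PORT A =====
-- _SEVERITY_RANK = {"none": 0, "low": 1, "medium": 2, "high": 3}
def sevRankDict : PySem.Dict String Int :=
  PySem.Dict.ofList [("none", 0), ("low", 1), ("medium", 2), ("high", 3)]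

-- one iteration of A's loop body (rows are dicts under the type convention, so the isinstance guard is always true)
def stepA (best : String) (r : List (String × String)) : String :=
  match (PySem.Dict.mk r).get? "severity" with
  | none => best                       -- sev = None, not in _SEVERITY_RANK
  | some sev =>
    match sevRankDict.get? sev with
    | none => best                     -- sev not in _SEVERITY_RANK
    | some rk => if sevRankDict.getD best 0 < rk then sev else best

def max_severity_from_raw_findings_py (rows : List (List (String × String))) : String :=
  rows.foldl stepA "none"

-- ===== PORT B =====
-- phase 1 of Source B: add each valid severity label to the presence set
def stepB (s : PySem.Set String) (r : List (String × String)) : PySem.Set String :=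
  match (PySem.Dict.mk r).get? "severity" with
  | none => s
  | some sev => if sevRankDict.contains sev then PySem.Set.add s sev else s

def max_severity_from_raw_findings_py_alt (rows : List (List (String × String))) : String :=
  let present := rows.foldl stepB PySem.Set.empty
  -- phase 2 of Source B: first of ("high", "medium", "low") present in the set, else "none"
  (["high", "medium", "low"].find? (fun label => PySem.Set.contains present label)).getD "none"

-- ===== PRECONDITION & SPEC =====
def Spec_max_severity_from_raw_findings_py (rows : List (List (String × String))) (out : String) : Prop := out = max_severity_from_raw_findings_py_alt rows
instance (rows : List (List (String × String))) (out : String) : Decidable (Spec_max_severity_from_raw_findings_py rows out) := by unfold Spec_max_severity_from_raw_findings_py; infer_instance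

-- ===== CLAIM (what is proved, stated in full; the proofs are below) =====
def Claim_equal_max_severity_from_raw_findings_py : Prop := ∀ (rows : List (List (String × String))), Dom_max_severity_from_raw_findings_py rows → Spec_max_severity_from_raw_findings_py rows (max_severity_from_raw_findings_py rows)

-- ===== LEMMAS AND PROOFS =====

-- whether some row's "severity" value is exactly lbl
def hasSev (rows : List (List (String × String))) (lbl : String) : Bool :=
  rows.any (fun r => (PySem.Dict.mk r).get? "severity" == some lbl)

-- top-down priority choice both ports reduce to
def prio (h m l : Bool) : String :=
  if h then "high" else if m then "medium" else if l then "low" else "none"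

lemma sevRank_mk : sevRankDict = PySem.Dict.mk [("none", 0), ("low", 1), ("medium", 2), ("high", 3)] := by decide

lemma hasSev_cons (r : List (String × String)) (rs : List (List (String × String))) (lbl : String) :
    hasSev (r :: rs) lbl = (((PySem.Dict.mk r).get? "severity" == some lbl) || hasSev rs lbl) := by
  simp [hasSev]

lemma A_char (rows : List (List (String × String))) :
    ∀ best : String, (best = "none" ∨ best = "low" ∨ best = "medium" ∨ best = "high") →
    rows.foldl stepA best =
      prio (hasSev rows "high" || best == "high")
           (hasSev rows "medium" || best == "medium")
           (hasSev rows "low" || best == "low") := by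
  induction rows with
  | nil =>
    intro best hb
    rcases hb with rfl | rfl | rfl | rfl <;> simp [hasSev, prio]
  | cons r rs ih =>
    intro best hb
    simp only [List.foldl_cons]
    cases hget : (PySem.Dict.mk r).get? "severity" with
    | none =>
      have hs : stepA best r = best := by simp [stepA, hget]
      rw [hs, ih best hb]
      simp [hasSev_cons, hget]
    | some sev =>
      have hs4 : sev = "none" ∨ sev = "low" ∨ sev = "medium" ∨ sev = "high" ∨ sevRankDict.get? sev = none := by
        by_cases h1 : sev = "none"; · exact .inl h1
        by_cases h2 : sev = "low"; · exact .inr (.inl h2)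
        by_cases h3 : sev = "medium"; · exact .inr (.inr (.inl h3))
        by_cases h4 : sev = "high"; · exact .inr (.inr (.inr (.inl h4)))
        refine .inr (.inr (.inr (.inr ?_)))
        rw [sevRank_mk]
        simp [PySem.Dict.get?, Ne.symm h1, Ne.symm h2, Ne.symm h3, Ne.symm h4]
      rcases hs4 with rfl | rfl | rfl | rfl | hnone
      case inr.inr.inr.inr =>
        have hs : stepA best r = best := by simp [stepA, hget, hnone]
        have e1 : sev ≠ "high" := by rintro rfl; rw [sevRank_mk] at hnone; simp [PySem.Dict.get?_mk_cons] at hnone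
        have e2 : sev ≠ "medium" := by rintro rfl; rw [sevRank_mk] at hnone; simp [PySem.Dict.get?_mk_cons] at hnone
        have e3 : sev ≠ "low" := by rintro rfl; rw [sevRank_mk] at hnone; simp [PySem.Dict.get?_mk_cons] at hnone
        have b1 : (sev == "high") = false := by simp [e1]
        have b2 : (sev == "medium") = false := by simp [e2]
        have b3 : (sev == "low") = false := by simp [e3]
        rw [hs, ih best hb]
        simp [hasSev_cons, hget, b1, b2, b3]
      all_goals
        rcases hb with rfl | rfl | rfl | rfl <;>
        · rw [ih (stepA _ r) (by simp only [stepA, hget]; decide)]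
          simp only [hasSev_cons, hget, stepA]
          cases hh : hasSev rs "high" <;> cases hm : hasSev rs "medium" <;> cases hl : hasSev rs "low" <;> decide

lemma B_char (rows : List (List (String × String))) :
    ∀ (s : PySem.Set String) (lbl : String), sevRankDict.contains lbl = true →
    PySem.Set.contains (rows.foldl stepB s) lbl = (PySem.Set.contains s lbl || hasSev rows lbl) := by
  induction rows with
  | nil => intro s lbl _; simp [hasSev]
  | cons r rs ih =>
    intro s lbl hlbl
    simp only [List.foldl_cons]
    rw [ih _ lbl hlbl, hasSev_cons]
    cases hget : (PySem.Dict.mk r).get? "severity" with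
    | none => simp [stepB, hget]
    | some sev =>
      by_cases hc : sevRankDict.contains sev = true
      · have hcomm : (sev == lbl) = decide (lbl = sev) := by
          by_cases hxy : sev = lbl
          · subst hxy; simp
          · simp [hxy, Ne.symm hxy]
        simp [stepB, hget, hc, Bool.or_assoc, hcomm]
      · have hne : (sev == lbl) = false := by
          simp only [beq_eq_false_iff_ne, ne_eq]
          rintro rfl; exact hc hlbl
        simp [stepB, hget, hc, hne]

-- ===== VERDICT (by name: the statement is the Claim_ definition above) =====
theorem max_severity_from_raw_findings_py_spec : Claim_equal_max_severity_from_raw_findings_py := by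
  intro rows _
  show max_severity_from_raw_findings_py rows = max_severity_from_raw_findings_py_alt rows
  rw [max_severity_from_raw_findings_py, A_char rows "none" (Or.inl rfl)]
  rw [max_severity_from_raw_findings_py_alt]
  simp only [List.find?]
  rw [B_char rows PySem.Set.empty "high" (by decide),
      B_char rows PySem.Set.empty "medium" (by decide),
      B_char rows PySem.Set.empty "low" (by decide)]
  cases hh : hasSev rows "high" <;> cases hm : hasSev rows "medium" <;> cases hl : hasSev rows "low" <;> decide
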